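-- pv_equiv track=rewrite | github.com/mitsuaki0321/maya-fake-tools | scripts/faketools/tools/common/code_editor/ui/code_editor.py | is_valid_module_name
-- ===== SOURCE A (Python) =====
-- def is_valid_module_name(text):
--     """Check if the text could be a valid module name (including dotted names)."""
--     if not text:
--         return False
--     # Module names can have dots for packages (e.g., package.subpackage.module)
--     # But shouldn't end with a dot or have consecutive dots
--     if text.startswith(".") or text.endswith(".") or ".." in text:
--         return False
--     # Check each part of the module name
--     parts = text.split(".")
--     for part in parts:
--         if not part:  # Empty part between dots
--             return False
--         # Each part should be a valid Python identifier
--         if not (part.replace("_", "").isalnum() and not part[0].isdigit()):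
--             return False
--     return True
-- ===== SOURCE B (Python) =====
-- def is_valid_module_name(text):
--     """Check if the text could be a valid module name (including dotted names)."""
--     if not text:
--         return False
--     empty = True         # current part has no characters yet
--     first_digit = False  # current part starts with a digit
--     all_ok = True        # every non-underscore char of the part is alphanumeric
--     has_alnum = False    # the part contains at least one alphanumeric char
--     for c in text:
--         if c == ".":
--             if empty or first_digit or not all_ok or not has_alnum:
--                 return False
--             empty, first_digit, all_ok, has_alnum = True, False, True, False
--         else:
--             if empty and c.isdigit():
--                 first_digit = True
--             if c != "_":
--                 if c.isalnum():
--                     has_alnum = True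
--                 else:
--                     all_ok = False
--             empty = False
--     return not (empty or first_digit or not all_ok or not has_alnum)
-- ===== Notes on version B (the rewrite author's own statement) =====
-- stated objective: alternative
-- what changed: Replaced the guard checks (prefix/suffix/double-dot substring), the split on dots and the per-part replace+isalnum test by one character-by-character scan that maintains per-part state (part emptiness, leading digit, non-alnum seen, alnum seen) and finalizes a part at each dot and at the end of the string, with no intermediate lists.
import Mathlib
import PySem

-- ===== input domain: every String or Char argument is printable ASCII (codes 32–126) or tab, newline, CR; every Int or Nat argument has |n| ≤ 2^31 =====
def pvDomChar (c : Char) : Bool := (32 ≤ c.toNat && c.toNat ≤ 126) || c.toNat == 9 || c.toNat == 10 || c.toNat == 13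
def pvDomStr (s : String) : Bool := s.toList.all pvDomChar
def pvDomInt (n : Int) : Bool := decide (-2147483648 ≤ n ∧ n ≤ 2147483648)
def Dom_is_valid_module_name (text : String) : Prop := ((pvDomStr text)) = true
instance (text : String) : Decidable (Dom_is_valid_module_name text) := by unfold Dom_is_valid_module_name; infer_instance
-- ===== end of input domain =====

-- B replaces A's guard + split('.') + per-part replace/isalnum checks by a single
-- character-by-character scan maintaining per-part state (alternative decomposition, same O(n) cost).


-- ===== PORT A =====
-- per-part check: part.replace("_", "").isalnum() and not part[0].isdigit()
-- (part[0] is guarded by the "if not part" branch in the loop, so pyGet? is some there;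
--  the .elim false default is unreachable)
def pvAPartOk (p : List Char) : Bool :=
  PySem.Chars.strIsalnum (PySem.Chars.replace p ['_'] []) &&
  !((PySem.List.pyGet? p 0).elim false PySem.Chars.isdigit)

-- the "for part in parts" loop with its early returns
def pvALoop : List (List Char) → Bool
  | [] => true
  | p :: ps => if p.isEmpty then false else if !(pvAPartOk p) then false else pvALoop ps

def is_valid_module_name (text : String) : Bool :=
  if text.toList.isEmpty then false
  else if PySem.Chars.startswith text.toList ['.'] || PySem.Chars.endswith text.toList ['.']
          || PySem.Chars.isIn ['.', '.'] text.toList then false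
  else pvALoop (PySem.Chars.splitOn text.toList ['.'])

-- ===== PORT B =====
-- single pass over the characters; state = (part empty so far, part starts with digit,
-- all non-underscore chars alnum so far, some alnum char seen)
def pvBLoop : List Char → Bool → Bool → Bool → Bool → Bool
  | [], empty, firstDigit, allOk, hasAlnum => !(empty || firstDigit || !allOk || !hasAlnum)
  | c :: t, empty, firstDigit, allOk, hasAlnum =>
    if c = '.' then
      if empty || firstDigit || !allOk || !hasAlnum then false
      else pvBLoop t true false true false
    else
      let firstDigit := if empty && PySem.Chars.isdigit c then true else firstDigit
      let hasAlnum := if !(c == '_') && PySem.Chars.isalnum c then true else hasAlnum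
      let allOk := if !(c == '_') && !PySem.Chars.isalnum c then false else allOk
      pvBLoop t false firstDigit allOk hasAlnum

def is_valid_module_name_alt (text : String) : Bool :=
  if text.toList.isEmpty then false
  else pvBLoop text.toList true false true false

-- ===== PRECONDITION & SPEC =====
def Spec_is_valid_module_name (text : String) (out : Bool) : Prop := out = is_valid_module_name_alt text
instance (text : String) (out : Bool) : Decidable (Spec_is_valid_module_name text out) := by unfold Spec_is_valid_module_name; infer_instance

-- ===== CLAIM (what is proved, stated in full; the proofs are below) =====
def Claim_equal_is_valid_module_name : Prop := ∀ (text : String), Dom_is_valid_module_name text → Spec_is_valid_module_name text (is_valid_module_name text)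

-- ===== LEMMAS AND PROOFS =====

-- canonical split on '.' (keeps empty pieces), the common spec of both ports
def splitDot : List Char → List (List Char)
  | [] => [[]]
  | c :: t => if c = '.' then [] :: splitDot t else (splitDot t).modifyHead (c :: ·)

-- per-part state, as functions of the accumulated part
def fdB (p : List Char) : Bool := p.head?.elim false PySem.Chars.isdigit
def okB (p : List Char) : Bool := p.all (fun c => c == '_' || PySem.Chars.isalnum c)
def haB (p : List Char) : Bool := p.any PySem.Chars.isalnum
def goodB (p : List Char) : Bool := !p.isEmpty && !fdB p && okB p && haB p

theorem splitDot_ne_nil (l : List Char) : splitDot l ≠ [] := by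
  cases l with
  | nil => simp [splitDot]
  | cons c t =>
    by_cases hc : c = '.' <;> simp [splitDot, hc]
    cases h : splitDot t with
    | nil => exact absurd h (splitDot_ne_nil t)
    | cons x xs => simp

theorem modifyHead_id (l : List (List Char)) : l.modifyHead (fun x => x) = l := by
  cases l <;> simp

theorem replace_go_underscore (l : List Char) :
    ∀ (fuel : Nat) (acc : List Char), l.length ≤ fuel →
      PySem.Chars.replace.go ['_'] [] fuel l acc
        = acc.reverse ++ l.filter (fun c => !(c == '_')) := by
  induction l with
  | nil => intro fuel acc _; cases fuel <;> simp [PySem.Chars.replace.go]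
  | cons c t ih =>
    intro fuel acc h
    cases fuel with
    | zero => simp at h
    | succ f =>
      by_cases hc : c = '_'
      · subst hc
        rw [show PySem.Chars.replace.go ['_'] [] (f+1) ('_'::t) acc
              = PySem.Chars.replace.go ['_'] [] f t acc by
            simp [PySem.Chars.replace.go, List.isPrefixOf]]
        rw [ih f acc (by simpa using h)]
        simp
      · have hbe : ('_' == c) = false := by simp [Ne.symm hc]
        rw [show PySem.Chars.replace.go ['_'] [] (f+1) (c::t) acc
              = PySem.Chars.replace.go ['_'] [] f t (c::acc) by
            simp [PySem.Chars.replace.go, List.isPrefixOf, hbe]]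
        rw [ih f (c::acc) (by simpa using h)]
        simp [hc]

theorem replace_underscore (p : List Char) :
    PySem.Chars.replace p ['_'] [] = p.filter (fun c => !(c == '_')) := by
  rw [show PySem.Chars.replace p ['_'] []
        = PySem.Chars.replace.go ['_'] [] p.length p [] by
      simp [PySem.Chars.replace]]
  simpa using replace_go_underscore p p.length [] le_rfl

theorem underscore_not_alnum : PySem.Chars.isalnum '_' = false := by decide

theorem strIsalnum_filter (p : List Char) :
    PySem.Chars.strIsalnum (p.filter (fun c => !(c == '_'))) = (okB p && haB p) := by
  rw [Bool.eq_iff_iff]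
  simp only [PySem.Chars.strIsalnum, okB, haB, Bool.and_eq_true, Bool.not_eq_true',
    List.all_eq_true, List.any_eq_true, Bool.or_eq_true, beq_iff_eq]
  constructor
  · rintro ⟨hne, hall⟩
    replace hne : p.filter (fun c => !(c == '_')) ≠ [] := List.isEmpty_eq_false_iff.mp hne
    obtain ⟨x, hx⟩ := List.exists_mem_of_ne_nil _ hne
    have hx' := List.mem_filter.mp hx
    refine ⟨fun y hy => ?_, x, hx'.1, hall x hx⟩
    by_cases hy_ : y = '_'
    · exact Or.inl hy_
    · refine Or.inr (hall y (List.mem_filter.mpr ⟨hy, ?_⟩))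
      simp [hy_]
  · rintro ⟨hall, x, hx, hxa⟩
    have hx_ : x ≠ '_' := by
      intro h; rw [h] at hxa; exact absurd hxa (by simp [underscore_not_alnum])
    constructor
    · have hxf : x ∈ p.filter (fun c => !(c == '_')) := by
        refine List.mem_filter.mpr ⟨hx, ?_⟩
        simp [hx_]
      simpa using List.ne_nil_of_mem hxf
    · intro y hy
      have hy' := List.mem_filter.mp hy
      rcases hall y hy'.1 with h | h
      · exact absurd (by simp [h] : (y == '_') = true) (by simpa using hy'.2)
      · exact h

theorem pyGet?_cons_zero (c : Char) (t : List Char) : PySem.List.pyGet? (c::t) 0 = some c := by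
  simp [PySem.List.pyGet?, PySem.List.pyIdx?]

theorem goodA_eq (p : List Char) : (!p.isEmpty && pvAPartOk p) = goodB p := by
  cases p with
  | nil => simp [goodB]
  | cons c t =>
    simp only [pvAPartOk, replace_underscore, strIsalnum_filter, pyGet?_cons_zero,
      Option.elim, goodB, fdB, List.head?_cons, List.isEmpty_cons]
    simp [Bool.and_comm, Bool.and_assoc]

theorem aLoop_all (ps : List (List Char)) :
    pvALoop ps = ps.all (fun p => !p.isEmpty && pvAPartOk p) := by
  induction ps with
  | nil => rfl
  | cons p ps ih =>
    cases he : p.isEmpty <;> cases hok : pvAPartOk p <;>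
      simp [pvALoop, he, hok, ih]

theorem splitOn_go (l : List Char) :
    ∀ (fuel : Nat) (cur : List Char) (acc : List (List Char)), l.length ≤ fuel →
      PySem.Chars.splitOn.go ['.'] fuel l cur acc
        = acc.reverse ++ (splitDot l).modifyHead (fun x => cur.reverse ++ x) := by
  induction l with
  | nil => intro fuel cur acc _; cases fuel <;> simp [PySem.Chars.splitOn.go, splitDot]
  | cons c t ih =>
    intro fuel cur acc h
    cases fuel with
    | zero => simp at h
    | succ f =>
      by_cases hc : c = '.'
      · subst hc
        rw [show PySem.Chars.splitOn.go ['.'] (f+1) ('.'::t) cur acc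
              = PySem.Chars.splitOn.go ['.'] f t [] (cur.reverse :: acc) by
            simp [PySem.Chars.splitOn.go, List.isPrefixOf]]
        rw [ih f [] (cur.reverse :: acc) (by simpa using h)]
        simp [splitDot, modifyHead_id]
      · have hbe : ('.' == c) = false := by simp [Ne.symm hc]
        rw [show PySem.Chars.splitOn.go ['.'] (f+1) (c::t) cur acc
              = PySem.Chars.splitOn.go ['.'] f t (c::cur) acc by
            simp [PySem.Chars.splitOn.go, List.isPrefixOf, hbe]]
        rw [ih f (c::cur) acc (by simpa using h)]
        simp only [splitDot, hc, if_false, List.modifyHead_modifyHead]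
        congr 2
        funext x
        simp

theorem splitOn_eq (l : List Char) : PySem.Chars.splitOn l ['.'] = splitDot l := by
  rw [show PySem.Chars.splitOn l ['.']
        = PySem.Chars.splitOn.go ['.'] (l.length + 1) l [] [] from rfl]
  rw [splitOn_go l (l.length + 1) [] [] (by omega)]
  simp [modifyHead_id]

theorem splitDot_append_dot (t : List Char) :
    splitDot (t ++ ['.']) = splitDot t ++ [[]] := by
  induction t with
  | nil => simp [splitDot]
  | cons c t ih =>
    by_cases hc : c = '.'
    · simp [splitDot, hc, ih]
    · simp only [List.cons_append, splitDot, hc, if_false, ih]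
      obtain ⟨x, xs, hx⟩ := List.exists_cons_of_ne_nil (splitDot_ne_nil t)
      simp [hx]

theorem mem_splitDot_dotdot (a b : List Char) :
    [] ∈ (splitDot (a ++ '.' :: '.' :: b)).tail := by
  induction a with
  | nil => simp [splitDot]
  | cons c a ih =>
    by_cases hc : c = '.' <;> simp only [List.cons_append, splitDot, hc, if_true, if_false]
    · exact List.mem_of_mem_tail ih
    · rw [List.tail_modifyHead]
      exact ih

theorem all_goodB_false_of_mem_nil {ps : List (List Char)} (h : [] ∈ ps) :
    ps.all goodB = false := by
  rw [List.all_eq_false]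
  exact ⟨[], h, by simp [goodB]⟩

-- A equals the canonical form
theorem a_eq_canon (l : List Char) :
    (if PySem.Chars.startswith l ['.'] || PySem.Chars.endswith l ['.']
        || PySem.Chars.isIn ['.', '.'] l then false
     else pvALoop (PySem.Chars.splitOn l ['.'])) = (splitDot l).all goodB := by
  by_cases hg : (PySem.Chars.startswith l ['.'] || PySem.Chars.endswith l ['.']
      || PySem.Chars.isIn ['.', '.'] l) = true
  · rw [if_pos hg]
    have hmem : [] ∈ splitDot l := by
      rcases Bool.or_eq_true _ _ |>.mp hg with hg | hg
      · rcases Bool.or_eq_true _ _ |>.mp hg with hg | hg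
        · -- starts with '.'
          obtain ⟨t, rfl⟩ := (PySem.Chars.startswith_iff l ['.']).mp hg
          simp [splitDot]
        · -- ends with '.'
          obtain ⟨t, rfl⟩ := (PySem.Chars.endswith_iff l ['.']).mp hg
          rw [splitDot_append_dot]
          simp
      · -- ".." is a substring
        obtain ⟨a, b, rfl⟩ := (PySem.Chars.isIn_iff_infix ['.', '.'] l).mp hg
        have h2 : a ++ ['.', '.'] ++ b = a ++ '.' :: '.' :: b := by simp
        rw [h2]
        exact List.mem_of_mem_tail (mem_splitDot_dotdot a b)
    exact (all_goodB_false_of_mem_nil hmem).symm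
  · rw [if_neg hg, aLoop_all, splitOn_eq]
    simp only [goodA_eq]

-- B-side: state-update lemmas for the accumulated part
theorem fdB_append (cur : List Char) (c : Char) :
    fdB (cur ++ [c]) = (if cur.isEmpty && PySem.Chars.isdigit c then true else fdB cur) := by
  cases cur <;> simp [fdB]

theorem okB_append (cur : List Char) (c : Char) :
    okB (cur ++ [c]) = (if !(c == '_') && !PySem.Chars.isalnum c then false else okB cur) := by
  by_cases hu : c = '_'
  · subst hu; simp [okB]
  · cases ha : PySem.Chars.isalnum c <;> simp [okB, hu, ha]

theorem haB_append (cur : List Char) (c : Char) :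
    haB (cur ++ [c]) = (if !(c == '_') && PySem.Chars.isalnum c then true else haB cur) := by
  by_cases hu : c = '_'
  · subst hu; simp [haB, underscore_not_alnum]
  · cases ha : PySem.Chars.isalnum c <;> simp [haB, hu, ha, Bool.or_comm]

theorem bLoop_eq (t : List Char) :
    ∀ cur : List Char,
      pvBLoop t cur.isEmpty (fdB cur) (okB cur) (haB cur)
        = ((splitDot t).modifyHead (fun x => cur ++ x)).all goodB := by
  induction t with
  | nil =>
    intro cur
    simp [pvBLoop, splitDot, goodB, Bool.not_or]
  | cons c t ih =>
    intro cur
    by_cases hc : c = '.'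
    · subst hc
      have h0 : pvBLoop t true false true false = (splitDot t).all goodB := by
        have := ih []
        simpa [fdB, okB, haB, modifyHead_id] using this
      have hgood : goodB cur = !(cur.isEmpty || fdB cur || !okB cur || !haB cur) := by
        simp [goodB, Bool.not_or]
      cases hbad : (cur.isEmpty || fdB cur || !okB cur || !haB cur) <;>
        simp [pvBLoop, splitDot, hbad, h0, hgood]
    · rw [show pvBLoop (c::t) cur.isEmpty (fdB cur) (okB cur) (haB cur)
            = pvBLoop t false
                (if cur.isEmpty && PySem.Chars.isdigit c then true else fdB cur)
                (if !(c == '_') && !PySem.Chars.isalnum c then false else okB cur)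
                (if !(c == '_') && PySem.Chars.isalnum c then true else haB cur)
              from by simp [pvBLoop, hc]]
      rw [← fdB_append, ← okB_append, ← haB_append,
          show (false : Bool) = (cur ++ [c]).isEmpty by simp]
      rw [ih (cur ++ [c])]
      simp only [splitDot, hc, if_false, List.modifyHead_modifyHead]
      congr 2
      funext x
      simp

theorem b_eq_canon (l : List Char) :
    pvBLoop l true false true false = (splitDot l).all goodB := by
  have := bLoop_eq l []
  simpa [fdB, okB, haB, modifyHead_id] using this

-- ===== VERDICT (by name: the statement is the Claim_ definition above) =====
theorem is_valid_module_name_spec : Claim_equal_is_valid_module_name := by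
  intro text _
  unfold Spec_is_valid_module_name is_valid_module_name is_valid_module_name_alt
  cases he : text.toList.isEmpty
  · simp only [Bool.false_eq_true, if_false]
    rw [a_eq_canon text.toList, b_eq_canon]
  · simp
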